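-- pv_equiv track=rewrite | github.com/mudler/universal-ml-intern | scripts/find_examples.py | _pattern_priority
-- ===== SOURCE A (Python) =====
-- EXAMPLE_PATTERNS = [
--     "scripts",
--     "examples", "example",
--     "notebooks", "notebook",
--     "tutorials", "tutorial",
--     "quickstart", "walkthroughs", "walkthrough",
--     "cookbook", "cookbooks", "recipes", "recipe",
--     "demos", "demo", "samples", "sample",
--     "guides", "guide",
--     "getting-started", "getting_started",
--     "playground", "howto", "how-to",
--     "use-cases", "usecases", "use_cases",
--     "sandbox", "showcase",
-- ]
--
-- def _pattern_priority(path: str) -> tuple[int, int, int]: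
--     path_lower = path.lower()
--     parts = path_lower.split("/")
--     in_examples_dir = 0 if (parts[0] in ("examples", "example")) else 1
--     best_priority = 999
--     best_depth_at_match = -1
--     for i, pattern in enumerate(EXAMPLE_PATTERNS):
--         if pattern in parts:
--             depth = len(parts) - 1 - parts[::-1].index(pattern)
--             if depth > best_depth_at_match or (depth == best_depth_at_match and i < best_priority):
--                 best_priority = i
--                 best_depth_at_match = depth
--     return (in_examples_dir, best_priority, len(parts))
-- ===== SOURCE B (Python) =====
-- EXAMPLE_PATTERNS = [
--     "scripts",
--     "examples", "example",
--     "notebooks", "notebook",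
--     "tutorials", "tutorial",
--     "quickstart", "walkthroughs", "walkthrough",
--     "cookbook", "cookbooks", "recipes", "recipe",
--     "demos", "demo", "samples", "sample",
--     "guides", "guide",
--     "getting-started", "getting_started",
--     "playground", "howto", "how-to",
--     "use-cases", "usecases", "use_cases",
--     "sandbox", "showcase",
-- ]
--
-- _PRIORITY = {p: i for i, p in enumerate(EXAMPLE_PATTERNS)}
--
--
-- def _pattern_priority(path: str) -> tuple[int, int, int]:
--     parts = path.lower().split("/")
--     in_examples_dir = 0 if parts[0] in ("examples", "example") else 1
--     best_priority = 999
--     for part in parts: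
--         if part in _PRIORITY:
--             best_priority = _PRIORITY[part]
--     return (in_examples_dir, best_priority, len(parts))
-- ===== Notes on version B (the rewrite author's own statement) =====
-- stated objective: simpler
-- what changed: A loops over all 30 patterns, scanning the parts list and a reversed copy (.index) for each and tie-breaking on depth; B builds a pattern->index dict once and makes a single pass over the path's parts, letting the last (deepest) matching part overwrite the best priority, which is equivalent because a part equals at most one pattern.
import Mathlib
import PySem

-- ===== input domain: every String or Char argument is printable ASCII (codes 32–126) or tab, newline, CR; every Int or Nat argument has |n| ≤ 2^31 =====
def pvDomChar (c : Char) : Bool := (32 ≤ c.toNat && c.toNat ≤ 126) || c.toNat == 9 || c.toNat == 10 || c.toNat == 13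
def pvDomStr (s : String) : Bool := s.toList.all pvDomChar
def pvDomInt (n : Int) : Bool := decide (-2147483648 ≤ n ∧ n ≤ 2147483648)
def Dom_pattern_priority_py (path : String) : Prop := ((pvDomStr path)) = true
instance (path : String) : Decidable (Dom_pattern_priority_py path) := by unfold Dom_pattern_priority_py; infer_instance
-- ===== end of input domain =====

-- B replaces A's loop over the 30 patterns (with reverse .index scans and a depth tie-break)
-- by one dict lookup per path part, keeping the last (deepest) match; objective: simpler.

def pvPatterns : List String :=
  ["scripts",
   "examples", "example",
   "notebooks", "notebook",
   "tutorials", "tutorial",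
   "quickstart", "walkthroughs", "walkthrough",
   "cookbook", "cookbooks", "recipes", "recipe",
   "demos", "demo", "samples", "sample",
   "guides", "guide",
   "getting-started", "getting_started",
   "playground", "howto", "how-to",
   "use-cases", "usecases", "use_cases",
   "sandbox", "showcase"]

-- ===== PORT A =====
-- depth = len(parts) - 1 - parts[::-1].index(pattern)  (the .getD 0 is unreachable: the
-- loop body only computes depth under the guard 'pattern in parts')
def pvDepth (parts : List String) (pattern : String) : Int :=
  (parts.length : Int) - 1 -
    ((PySem.List.index? ((PySem.List.slice? parts none none (-1)).getD []) pattern).getD 0 : Int)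

-- loop body of A, state = (best_priority, best_depth_at_match)
def pvStepA (parts : List String) (st : Int × Int) (ip : Int × String) : Int × Int :=
  if ip.2 ∈ parts then
    let depth := pvDepth parts ip.2
    if depth > st.2 ∨ (depth = st.2 ∧ ip.1 < st.1) then (ip.1, depth) else st
  else st

def pattern_priority_py (path : String) : Int × Int × Int :=
  let path_lower := PySem.Str.lower path
  let parts := (PySem.Str.split? path_lower "/").getD []  -- sep "/" ≠ "", so split? is some; getD unreachable
  let in_examples_dir : Int :=
    if PySem.List.pyGet? parts 0 = some "examples" ∨ PySem.List.pyGet? parts 0 = some "example"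
    then 0 else 1
  let st := (PySem.List.enumerate pvPatterns 0).foldl (pvStepA parts) (999, -1)
  (in_examples_dir, st.1, (parts.length : Int))

-- ===== PORT B =====
-- _PRIORITY = {p: i for i, p in enumerate(EXAMPLE_PATTERNS)}
def pvPriorityDict : PySem.Dict String Int :=
  (PySem.List.enumerate pvPatterns 0).foldl (fun d ip => d.insert ip.2 ip.1) PySem.Dict.empty

-- loop body of B: last match wins
def pvStepB (b : Int) (part : String) : Int :=
  match pvPriorityDict.get? part with
  | some i => i
  | none => b

def pattern_priority_py_alt (path : String) : Int × Int × Int :=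
  let parts := (PySem.Str.split? (PySem.Str.lower path) "/").getD []
  let in_examples_dir : Int :=
    if PySem.List.pyGet? parts 0 = some "examples" ∨ PySem.List.pyGet? parts 0 = some "example"
    then 0 else 1
  let best_priority := parts.foldl pvStepB 999
  (in_examples_dir, best_priority, (parts.length : Int))

-- ===== PRECONDITION & SPEC =====
def Spec_pattern_priority_py (path : String) (out : Int × Int × Int) : Prop := out = pattern_priority_py_alt path
instance (path : String) (out : Int × Int × Int) : Decidable (Spec_pattern_priority_py path out) := by unfold Spec_pattern_priority_py; infer_instance

-- ===== CLAIM (what is proved, stated in full; the proofs are below) =====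
def Claim_equal_pattern_priority_py : Prop := ∀ (path : String), Dom_pattern_priority_py path → Spec_pattern_priority_py path (pattern_priority_py path)

-- ===== LEMMAS AND PROOFS =====

theorem pvPatterns_nodup : pvPatterns.Nodup := by decide

-- the dict built from enumerate looks up the index in the (nodup) pattern list
theorem pv_foldl_enum_insert_get (ps : List String) (hnd : ps.Nodup) (start : Int)
    (d : PySem.Dict String Int) (s : String) :
    ((PySem.List.enumerate ps start).foldl (fun d ip => d.insert ip.2 ip.1) d).get? s
      = if s ∈ ps then some (start + (ps.idxOf s : Int)) else d.get? s := by
  induction ps generalizing start d with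
  | nil => simp [PySem.List.enumerate]
  | cons p t ih =>
    rw [PySem.List.enumerate_cons]
    simp only [List.foldl_cons]
    rw [ih hnd.of_cons (start + 1) (d.insert p start)]
    by_cases hmem : s ∈ t
    · have hne : s ≠ p := fun h => (List.nodup_cons.1 hnd).1 (h ▸ hmem)
      simp [hmem, List.mem_cons, hne, List.idxOf_cons_ne _ (Ne.symm hne)]
      ring
    · by_cases hsp : s = p
      · subst hsp
        simp [hmem, PySem.Dict.get?_insert_self, List.idxOf_cons_self]
      · rw [PySem.Dict.get?_insert_of_ne _ _ hsp]
        simp [hmem, hsp]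

theorem pv_dict_get (s : String) :
    pvPriorityDict.get? s
      = if s ∈ pvPatterns then some ((pvPatterns.idxOf s : Nat) : Int) else none := by
  unfold pvPriorityDict
  rw [pv_foldl_enum_insert_get pvPatterns pvPatterns_nodup 0 PySem.Dict.empty s]
  simp [PySem.Dict.get?_empty]

-- the common specification: index of the LAST part that is a pattern, else the default
def pvSpecVal (parts : List String) (b : Int) : Int :=
  match parts.reverse.find? (fun x => decide (x ∈ pvPatterns)) with
  | some q => ((pvPatterns.idxOf q : Nat) : Int)
  | none => b

-- B's fold computes pvSpecVal
theorem pvB_fold (parts : List String) (b : Int) :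
    parts.foldl pvStepB b = pvSpecVal parts b := by
  induction parts using List.reverseRecOn generalizing b with
  | nil => simp [pvSpecVal]
  | append_singleton xs x ih =>
    rw [List.foldl_append]
    simp only [List.foldl_cons, List.foldl_nil]
    unfold pvSpecVal
    rw [List.reverse_append]
    simp only [List.reverse_singleton, List.singleton_append, List.find?_cons]
    by_cases hx : x ∈ pvPatterns
    · simp [hx, pvStepB, pv_dict_get]
    · simpa [hx, pvStepB, pv_dict_get] using ih b

theorem pvDepth_eq (parts : List String) (p : String) :
    pvDepth parts p
      = (parts.length : Int) - 1 - ((PySem.List.index? parts.reverse p).getD 0 : Int) := by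
  simp [pvDepth, PySem.List.slice?_none_none_neg_one]

-- phase 1 / phase 3 invariants for A's fold
theorem pvA_lt_inv (parts : List String) (dq : Int) (l : List String) :
    ∀ (s : Int) (st : Int × Int),
      (∀ p ∈ l, p ∈ parts → pvDepth parts p < dq) → st.2 < dq →
      (((PySem.List.enumerate l s).foldl (pvStepA parts) st).2 < dq) := by
  induction l with
  | nil => intro s st _ h2; simpa [PySem.List.enumerate] using h2
  | cons p t ih =>
    intro s st h1 h2
    rw [PySem.List.enumerate_cons]
    simp only [List.foldl_cons]
    apply ih (s + 1) _ (fun x hx hxp => h1 x (List.mem_cons_of_mem _ hx) hxp)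
    unfold pvStepA
    by_cases hp : p ∈ parts
    · have hd := h1 p (List.mem_cons_self ..) hp
      simp only [hp, if_true]
      split_ifs with hc
      · exact hd
      · exact h2
    · simpa [hp] using h2

theorem pvA_fix_inv (parts : List String) (l : List String) :
    ∀ (s : Int) (st : Int × Int),
      (∀ p ∈ l, p ∈ parts → pvDepth parts p < st.2) →
      ((PySem.List.enumerate l s).foldl (pvStepA parts) st) = st := by
  induction l with
  | nil => intro s st _; simp [PySem.List.enumerate]
  | cons p t ih =>
    intro s st h1
    rw [PySem.List.enumerate_cons]
    simp only [List.foldl_cons]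
    have hstep : pvStepA parts st (s, p) = st := by
      unfold pvStepA
      by_cases hp : p ∈ parts
      · have hd := h1 p (List.mem_cons_self ..) hp
        simp only [hp, if_true]
        have : ¬ (pvDepth parts p > st.2 ∨ (pvDepth parts p = st.2 ∧ s < st.1)) := by
          rintro (h | ⟨h, _⟩) <;> omega
        simp [this]
      · simp [hp]
    rw [hstep]
    exact ih (s + 1) st (fun x hx hxp => h1 x (List.mem_cons_of_mem _ hx) hxp)

-- A's fold computes pvSpecVal 999
theorem pv_idxOf_append (P1 P2 : List String) (q : String) (h : q ∉ P1) :
    (P1 ++ q :: P2).idxOf q = P1.length := by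
  induction P1 with
  | nil => simp
  | cons a t ih =>
    have hne : a ≠ q := fun hq => h (hq ▸ List.mem_cons_self ..)
    simp only [List.cons_append, List.idxOf_cons_ne _ hne,
      ih (fun hm => h (List.mem_cons_of_mem _ hm)), List.length_cons]

theorem pvA_fold (parts : List String) :
    ((PySem.List.enumerate pvPatterns 0).foldl (pvStepA parts) (999, -1)).1
      = pvSpecVal parts 999 := by
  unfold pvSpecVal
  cases hfind : parts.reverse.find? (fun x => decide (x ∈ pvPatterns)) with
  | none =>
    have hnone := List.find?_eq_none.1 hfind
    have : ((PySem.List.enumerate pvPatterns 0).foldl (pvStepA parts) (999, -1)) = (999, -1) := by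
      apply pvA_fix_inv
      intro p hp hpp
      exact absurd (by simpa using hnone p (List.mem_reverse.2 hpp)) (by simp [hp])
    rw [this]
  | some q =>
    obtain ⟨hq', i, hi, hri, hmin⟩ := List.find?_eq_some_iff_getElem.1 hfind
    have hq : q ∈ pvPatterns := by simpa using hq'
    have hlen : parts.reverse.length = parts.length := List.length_reverse
    have hmin' : ∀ (j : Nat) (hj : j < parts.reverse.length), j < i →
        parts.reverse[j] ∉ pvPatterns := by
      intro j hj hji
      have h2 := hmin j hji
      simp only [Bool.not_eq_true', decide_eq_false_iff_not] at h2
      exact h2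
    -- first index of any present pattern p in parts.reverse is ≥ i, = i only for q
    have hidx : ∀ p, p ∈ pvPatterns → p ∈ parts →
        ∃ k, PySem.List.index? parts.reverse p = some k ∧ i ≤ k ∧ (k = i → p = q) := by
      intro p hpP hpp
      have hpr : p ∈ parts.reverse := List.mem_reverse.2 hpp
      obtain ⟨k, hk⟩ := Option.isSome_iff_exists.1
        ((PySem.List.index?_isSome_iff parts.reverse p).2 hpr)
      obtain ⟨hklt, hrk, hfirst⟩ := PySem.List.getElem_of_index?_eq_some hk
      refine ⟨k, hk, ?_, ?_⟩
      · by_contra hlt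
        have hlt2 : k < i := by omega
        exact hmin' k hklt hlt2 (hrk.symm ▸ hpP)
      · intro hki; subst hki; rw [← hrk, hri]
    have hqparts : q ∈ parts := List.mem_reverse.1 (hri ▸ List.getElem_mem hi)
    have hiq : PySem.List.index? parts.reverse q = some i := by
      obtain ⟨k, hk, hik, _⟩ := hidx q hq hqparts
      obtain ⟨hklt, hrk, hfirst⟩ := PySem.List.getElem_of_index?_eq_some hk
      rcases Nat.lt_or_ge i k with h | h
      · exact absurd hri (hfirst i h)
      · have : k = i := by omega
        rwa [this] at hk
    have hilen : i < parts.length := by omega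
    have hdqq : pvDepth parts q = (parts.length : Int) - 1 - (i : Int) := by
      rw [pvDepth_eq, hiq]; rfl
    have hdqpos : (0 : Int) ≤ (parts.length : Int) - 1 - (i : Int) := by omega
    have hdlt : ∀ p, p ∈ pvPatterns → p ∈ parts → p ≠ q →
        pvDepth parts p < (parts.length : Int) - 1 - (i : Int) := by
      intro p hpP hpp hne
      obtain ⟨k, hk, hik, hkq⟩ := hidx p hpP hpp
      have hki : i ≠ k := fun h => hne (hkq h.symm)
      rw [pvDepth_eq, hk]
      have hklt : k < parts.reverse.length := (PySem.List.getElem_of_index?_eq_some hk).1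
      simp only [Option.getD_some]
      omega
    -- split the pattern list at q
    obtain ⟨P1, P2, hsplit⟩ := List.append_of_mem hq
    have hnd := hsplit ▸ pvPatterns_nodup
    rw [List.nodup_append] at hnd
    have hqP1 : q ∉ P1 := fun h => hnd.2.2 q h q (List.mem_cons_self ..) rfl
    have hqP2 : q ∉ P2 := (List.nodup_cons.1 hnd.2.1).1
    have hidxq : (P1 ++ q :: P2).idxOf q = P1.length := pv_idxOf_append P1 P2 q hqP1
    rw [hsplit, PySem.List.enumerate_append, PySem.List.enumerate_cons, List.foldl_append]
    simp only [List.foldl_cons]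
    set st1 := (PySem.List.enumerate P1 0).foldl (pvStepA parts) (999, -1) with hst1def
    have hst1 : st1.2 < (parts.length : Int) - 1 - (i : Int) := by
      apply pvA_lt_inv parts ((parts.length : Int) - 1 - (i : Int)) P1 0 (999, -1)
      · intro p hp hpp
        have hpP : p ∈ pvPatterns := by rw [hsplit]; exact List.mem_append_left _ hp
        exact hdlt p hpP hpp (fun h => hqP1 (h ▸ hp))
      · simp; omega
    have hstep : pvStepA parts st1 (0 + (P1.length : Int), q)
        = (0 + (P1.length : Int), (parts.length : Int) - 1 - (i : Int)) := by
      unfold pvStepA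
      simp only [hqparts, if_true, hdqq]
      simp
      intro h1 _
      exfalso
      omega
    rw [hstep]
    have hfix := pvA_fix_inv parts P2 (0 + (P1.length : Int) + 1)
      (0 + (P1.length : Int), (parts.length : Int) - 1 - (i : Int))
      (by
        intro p hp hpp
        have hpP : p ∈ pvPatterns := by
          rw [hsplit]; exact List.mem_append_right _ (List.mem_cons_of_mem _ hp)
        exact hdlt p hpP hpp (fun h => hqP2 (h ▸ hp)))
    rw [hfix, hidxq]
    simp

-- ===== VERDICT (by name: the statement is the Claim_ definition above) =====
theorem pattern_priority_py_spec : Claim_equal_pattern_priority_py := by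
  intro path _
  unfold Spec_pattern_priority_py pattern_priority_py pattern_priority_py_alt
  simp only [pvA_fold, pvB_fold]
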